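-- pv_equiv track=rewrite | github.com/Tamircohen28/baswana-sen-spanner-experiments | src/spanners/greedy.py | build_greedy_spanner
-- ===== SOURCE A (Python) =====
-- from collections import deque
-- from typing import Dict, List
--
-- def _bfs_distance(graph: Dict[int, List[int]], start: int, target: int, limit: int) -> int:
--     """
--     Compute BFS distance from start to target, stopping if distance exceeds limit.
--     Returns float('inf') if target is not reachable within limit.
--     """
--     if start == target:
--         return 0
--
--     # Bidirectional BFS could be faster, but simple BFS is sufficient for baseline
--     queue = deque([(start, 0)])
--     visited = {start}
--
--     while queue:
--         u, dist = queue.popleft()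
--
--         if dist >= limit:
--             continue
--
--         for v in graph.get(u, []):
--             if v == target:
--                 return dist + 1
--
--             if v not in visited:
--                 visited.add(v)
--                 queue.append((v, dist + 1))
--
--     return float('inf')
--
-- def build_greedy_spanner(G: Dict[int, List[int]], k: int) -> Dict[int, List[int]]:
--     """
--     Construct a (2k-1)-spanner using the Greedy algorithm.
--
--     Args:
--         G: Input graph (adjacency list). Assumed unweighted for this implementation.
--         k: Integer parameter, target stretch is 2k-1.
--
--     Returns:
--         Spanner H as adjacency list.
--     """
--     n = len(G)
--     if n == 0:
--         return {}
--
--     # Initialize empty spanner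
--     H = {v: [] for v in G}
--
--     # Extract all edges. Since undirected, store as sorted tuples (u, v) where u < v
--     edges = []
--     for u in G:
--         for v in G[u]:
--             if u < v:
--                 edges.append((u, v))
--
--     # For weighted graphs, we would sort edges here.
--     # For unweighted, arbitrary order (or random shuffle) is fine.
--     # We keep it deterministic based on vertex indices for reproducibility.
--
--     stretch_limit = 2 * k - 1
--
--     for u, v in edges:
--         # Check distance in current spanner H
--         # We only need to know if dist_H(u,v) > stretch_limit * 1
--         dist = _bfs_distance(H, u, v, stretch_limit)
--
--         if dist > stretch_limit:
--             # Add edge to spanner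
--             H[u].append(v)
--             H[v].append(u)
--
--     return H
-- ===== SOURCE B (Python) =====
-- def _ball(graph, start, limit):
--     """The set of vertices reachable from start within at most `limit` edges,
--     computed by iterated neighborhood closure: grow the whole ball by one
--     neighbor layer per round, stopping early once it stabilizes."""
--     ball = {start}
--     for _ in range(limit):
--         grown = set(ball)
--         for x in ball:
--             for y in graph.get(x, []):
--                 grown.add(y)
--         if grown == ball:
--             return ball
--         ball = grown
--     return ball
--
--
-- def build_greedy_spanner(G, k):
--     if not G:
--         return {}
--     H = {v: [] for v in G}
--     limit = 2 * k - 1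
--     for u, nbrs in G.items():
--         for v in nbrs:
--             if u < v and v not in _ball(H, u, limit):
--                 H[u].append(v)
--                 H[v].append(u)
--     return H
-- ===== Notes on version B (the rewrite author's own statement) =====
-- stated objective: alternative
-- what changed: The per-edge check is no longer a BFS at all: B computes the whole radius-(2k-1) ball around u by iterated neighborhood closure (ball := ball ∪ N(ball) once per round over the entire ball, no queue, no frontier, no visited set, no early target exit, stopping when the ball stabilizes) and then membership-tests v; the edge list is also not materialized — extraction and the add-to-H update are fused into one nested loop over G.
import Mathlib
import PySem

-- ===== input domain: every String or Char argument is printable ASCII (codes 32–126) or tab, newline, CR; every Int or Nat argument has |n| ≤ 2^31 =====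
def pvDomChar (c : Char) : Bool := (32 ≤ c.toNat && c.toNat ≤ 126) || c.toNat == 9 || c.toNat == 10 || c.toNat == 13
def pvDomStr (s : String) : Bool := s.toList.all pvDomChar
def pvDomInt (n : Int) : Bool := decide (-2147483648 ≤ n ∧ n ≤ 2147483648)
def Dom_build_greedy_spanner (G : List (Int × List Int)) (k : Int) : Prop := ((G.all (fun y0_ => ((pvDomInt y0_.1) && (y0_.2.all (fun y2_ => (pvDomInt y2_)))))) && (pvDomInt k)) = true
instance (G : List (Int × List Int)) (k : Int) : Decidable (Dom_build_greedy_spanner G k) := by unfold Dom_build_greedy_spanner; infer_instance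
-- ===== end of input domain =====

-- B replaces A's per-edge early-exit deque BFS by an iterated neighborhood-closure: it computes
-- the whole radius-(2k-1) ball around u as a set fixpoint and membership-tests v, and it fuses
-- edge extraction with the spanner update instead of materializing the edge list.

-- ===== PORT A =====

-- A: inner `for v in graph.get(u, []):` loop of _bfs_distance; `none` = `return dist + 1` was hit,
-- `some (q, vis)` = the loop finished with queue q and visited vis.
def pvAScan (target d : Int) : List Int → List (Int × Int) → PySem.Set Int → Option (List (Int × Int) × PySem.Set Int)
  | [], q, vis => some (q, vis)
  | y :: ys, q, vis =>
    if y = target then none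
    else if y ∈ vis then pvAScan target d ys q vis
    else pvAScan target d ys (q ++ [(y, d + 1)]) (PySem.Set.add vis y)

-- termination measure helpers for A's `while queue:` loop (not part of the algorithm)
def pvSlack (univ : List Int) (vis : PySem.Set Int) : Nat :=
  (univ.filter (fun y => decide (y ∉ vis))).length

theorem pvSlack_add (univ : List Int) (vis : PySem.Set Int) (y : Int)
    (hy : y ∈ univ) (hv : y ∉ vis) : pvSlack univ (PySem.Set.add vis y) < pvSlack univ vis := by
  unfold pvSlack
  have hcongr : ∀ z ∈ univ.filter (fun z => decide (z ∉ vis)),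
      (decide (z ∉ PySem.Set.add vis y)) = (decide (z ≠ y)) := by
    intro z hz
    have hzv : z ∉ vis := by simpa using (List.of_mem_filter hz)
    simp [PySem.Set.mem_add, hzv]
  calc (univ.filter (fun z => decide (z ∉ PySem.Set.add vis y))).length
      = ((univ.filter (fun z => decide (z ∉ vis))).filter (fun z => decide (z ∉ PySem.Set.add vis y))).length := by
        rw [List.filter_filter]
        congr 1
        apply List.filter_congr
        intro z hz
        by_cases h1 : z ∈ PySem.Set.add vis y
        · have : z ∈ vis ∨ z = y := (PySem.Set.mem_add vis y z).1 h1
          rcases this with h | h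
          · simp [h, h1]
          · subst h; simp [hv]
        · have : z ∉ vis := fun hz => h1 ((PySem.Set.mem_add vis y z).2 (Or.inl hz))
          simp [h1, this]
    _ = ((univ.filter (fun z => decide (z ∉ vis))).filter (fun z => decide (z ≠ y))).length := by
        rw [List.filter_congr hcongr]
    _ < (univ.filter (fun z => decide (z ∉ vis))).length := by
        rw [List.length_filter_lt_length_iff_exists]
        exact ⟨y, List.mem_filter.2 ⟨hy, by simpa using hv⟩, by simp⟩

theorem pvAScan_measure (univ : List Int) (target d : Int) :
    ∀ (ys : List Int) (q : List (Int × Int)) (vis : PySem.Set Int) (q' : List (Int × Int)) (vis' : PySem.Set Int),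
    (∀ y ∈ ys, y ∈ univ) → pvAScan target d ys q vis = some (q', vis') →
    q'.length + pvSlack univ vis' ≤ q.length + pvSlack univ vis := by
  intro ys
  induction ys with
  | nil =>
    intro q vis q' vis' _ h
    simp [pvAScan] at h
    exact le_of_eq (by rw [h.1, h.2])
  | cons y ys ih =>
    intro q vis q' vis' hmem h
    by_cases ht : y = target
    · simp [pvAScan, ht] at h
    · by_cases hv : y ∈ vis
      · rw [pvAScan, if_neg ht, if_pos hv] at h
        exact ih q vis q' vis' (fun z hz => hmem z (List.mem_cons_of_mem _ hz)) h
      · rw [pvAScan, if_neg ht, if_neg hv] at h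
        have h1 := ih _ _ q' vis' (fun z hz => hmem z (List.mem_cons_of_mem _ hz)) h
        have h2 := pvSlack_add univ vis y (hmem y List.mem_cons_self) hv
        simp at h1
        omega

-- A: the `while queue:` loop of _bfs_distance. `none` = fell through (`return float('inf')`),
-- `some dd` = returned distance dd.
def pvALoop (g : List (Int × List Int)) (target limit : Int) :
    List (Int × Int) → PySem.Set Int → Option Int
  | [], _ => none
  | (x, d) :: qs, vis =>
    if limit ≤ d then pvALoop g target limit qs vis
    else
      match h : pvAScan target d (PySem.Dict.getD (PySem.Dict.mk g) x []) qs vis with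
      | none => some (d + 1)
      | some (q', vis') => pvALoop g target limit q' vis'
termination_by q vis => q.length + pvSlack (g.flatMap Prod.snd) vis
decreasing_by
  · simp
  · have hsub : ∀ y ∈ PySem.Dict.getD (PySem.Dict.mk g) x [], y ∈ g.flatMap Prod.snd := by
      intro y hy
      unfold PySem.Dict.getD PySem.Dict.get? at hy
      cases hf : (PySem.Dict.mk g).items.find? (fun p => p.1 == x) with
      | none => rw [hf] at hy; simp at hy
      | some p =>
        rw [hf] at hy
        simp at hy
        have hp : p ∈ g := List.mem_of_find?_eq_some hf
        exact List.mem_flatMap.2 ⟨p, hp, hy⟩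
    have := pvAScan_measure (g.flatMap Prod.snd) target d _ qs vis q' vis' hsub h
    simp
    omega

-- A: _bfs_distance. `none` stands for float('inf').
def pvBfs (g : List (Int × List Int)) (start target limit : Int) : Option Int :=
  if start = target then some 0
  else pvALoop g target limit [(start, 0)] (PySem.Set.ofList [start])

-- A: build_greedy_spanner. `dist > stretch_limit` with dist possibly inf is the match below
-- (inf > anything is true). H[u].append / H[v].append are Dict.modify — exact whenever the key
-- is present, which Pre_ guarantees (Python raises KeyError otherwise).
def build_greedy_spanner (G : List (Int × List Int)) (k : Int) : List (Int × List Int) :=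
  if G.length = 0 then []
  else
    let H0 : PySem.Dict Int (List Int) :=
      G.foldl (fun h p => PySem.Dict.insert h p.1 ([] : List Int)) (PySem.Dict.mk [])
    let edges : List (Int × Int) :=
      G.foldl (fun es p =>
        (PySem.Dict.getD (PySem.Dict.mk G) p.1 []).foldl
          (fun es v => if p.1 < v then es ++ [(p.1, v)] else es) es) []
    let stretch_limit := 2 * k - 1
    (edges.foldl (fun H e =>
      let dist := pvBfs H.items e.1 e.2 stretch_limit
      if (match dist with | none => true | some dd => decide (stretch_limit < dd)) then
        PySem.Dict.modify (PySem.Dict.modify H e.1 [] (fun l => l ++ [e.2])) e.2 [] (fun l => l ++ [e.1])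
      else H) H0).items

-- ===== PORT B =====

-- B: `grown = set(ball); for x in ball: for y in graph.get(x, []): grown.add(y)` — one closure round
def pvGrow (g : List (Int × List Int)) (ball : PySem.Set Int) : PySem.Set Int :=
  ball.foldl (fun grown x =>
    (PySem.Dict.getD (PySem.Dict.mk g) x []).foldl (fun a y => PySem.Set.add a y) grown) ball

-- B: `for _ in range(limit):` with the `if grown == ball: return ball` stabilization exit
def pvBallGo (g : List (Int × List Int)) : Nat → PySem.Set Int → PySem.Set Int
  | 0, ball => ball
  | r + 1, ball =>
    let grown := pvGrow g ball
    if PySem.Set.equal grown ball then ball else pvBallGo g r grown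

-- B: _ball
def pvBall (g : List (Int × List Int)) (start limit : Int) : PySem.Set Int :=
  pvBallGo g limit.toNat (PySem.Set.ofList [start])

def build_greedy_spanner_alt (G : List (Int × List Int)) (k : Int) : List (Int × List Int) :=
  if G.length = 0 then []
  else
    let H0 : PySem.Dict Int (List Int) :=
      G.foldl (fun h p => PySem.Dict.insert h p.1 ([] : List Int)) (PySem.Dict.mk [])
    let limit := 2 * k - 1
    (G.foldl (fun H p =>
      p.2.foldl (fun H v =>
        if p.1 < v ∧ v ∉ pvBall H.items p.1 limit then
          PySem.Dict.modify (PySem.Dict.modify H p.1 [] (fun l => l ++ [v])) v [] (fun l => l ++ [p.1])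
        else H) H) H0).items

-- ===== PRECONDITION & SPEC =====
-- Pre_ excludes only (a) association lists with duplicate keys, which a Python dict cannot carry,
-- and (b) inputs on which A raises KeyError: an extracted edge (u, v) with u < v whose endpoint v
-- is not a key of G (such a v never occurs in the spanner H, so the BFS distance is inf and
-- H[v].append(u) is always reached and raises).
def Pre_build_greedy_spanner (G : List (Int × List Int)) (k : Int) : Prop :=
  (G.map Prod.fst).Nodup ∧ ∀ p ∈ G, ∀ v ∈ p.2, p.1 < v → v ∈ G.map Prod.fst
instance (G : List (Int × List Int)) (k : Int) : Decidable (Pre_build_greedy_spanner G k) := by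
  unfold Pre_build_greedy_spanner; infer_instance

def pvWitness_build_greedy_spanner : (List (Int × List Int)) × Int := ([(0, [1]), (1, [0])], 2)

def Spec_build_greedy_spanner (G : List (Int × List Int)) (k : Int) (out : List (Int × List Int)) : Prop := out = build_greedy_spanner_alt G k
instance (G : List (Int × List Int)) (k : Int) (out : List (Int × List Int)) : Decidable (Spec_build_greedy_spanner G k out) := by unfold Spec_build_greedy_spanner; infer_instance

-- ===== CLAIM (what is proved, stated in full; the proofs are below) =====
def Claim_equal_build_greedy_spanner : Prop := ∀ (G : List (Int × List Int)) (k : Int), Dom_build_greedy_spanner G k → Pre_build_greedy_spanner G k → Spec_build_greedy_spanner G k (build_greedy_spanner G k)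

-- ===== LEMMAS AND PROOFS =====

-- Proof-layer middle model: a level-synchronized BFS. A's deque loop is first shown equal to it
-- (pvSim/pvDecide), and it is then shown equal to B's ball closure (pvRounds_iff_ball).

def pvBScan (target : Int) : List Int → List Int → PySem.Set Int → Option (List Int × PySem.Set Int)
  | [], nxt, vis => some (nxt, vis)
  | y :: ys, nxt, vis =>
    if y = target then none
    else if y ∈ vis then pvBScan target ys nxt vis
    else pvBScan target ys (nxt ++ [y]) (PySem.Set.add vis y)

def pvBFrontier (g : List (Int × List Int)) (target : Int) :
    List Int → List Int → PySem.Set Int → Option (List Int × PySem.Set Int)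
  | [], nxt, vis => some (nxt, vis)
  | x :: xs, nxt, vis =>
    match pvBScan target (PySem.Dict.getD (PySem.Dict.mk g) x []) nxt vis with
    | none => none
    | some (nxt', vis') => pvBFrontier g target xs nxt' vis'

def pvBRounds (g : List (Int × List Int)) (target : Int) :
    Nat → List Int → PySem.Set Int → Bool
  | 0, _, _ => false
  | r + 1, frontier, vis =>
    match pvBFrontier g target frontier [] vis with
    | none => true
    | some (nxt, vis') => if nxt = [] then false else pvBRounds g target r nxt vis'

def pvBWithin (g : List (Int × List Int)) (start target limit : Int) : Bool :=
  if start = target then true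
  else pvBRounds g target limit.toNat [start] (PySem.Set.ofList [start])

-- continuation of the level BFS from mid-round state
def pvBMid (g : List (Int × List Int)) (target : Int) :
    Nat → List Int → List Int → PySem.Set Int → Bool
  | 0, _, _, _ => false
  | r + 1, F, N, vis =>
    match pvBFrontier g target F N vis with
    | none => true
    | some (nxt, vis') => if nxt = [] then false else pvBMid g target r nxt [] vis'

-- unfold lemmas for the well-founded pvALoop
theorem pvALoop_nil (g : List (Int × List Int)) (target limit : Int) (vis : PySem.Set Int) :
    pvALoop g target limit [] vis = none := by
  rw [pvALoop.eq_def]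

theorem pvALoop_cons_skip (g : List (Int × List Int)) (target limit x d : Int)
    (qs : List (Int × Int)) (vis : PySem.Set Int) (hd : limit ≤ d) :
    pvALoop g target limit ((x, d) :: qs) vis = pvALoop g target limit qs vis := by
  rw [pvALoop.eq_def]; simp [hd]

theorem pvALoop_cons_go (g : List (Int × List Int)) (target limit x d : Int)
    (qs : List (Int × Int)) (vis : PySem.Set Int) (hd : ¬ limit ≤ d) :
    pvALoop g target limit ((x, d) :: qs) vis =
      match pvAScan target d (PySem.Dict.getD (PySem.Dict.mk g) x []) qs vis with
      | none => some (d + 1)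
      | some (q', vis') => pvALoop g target limit q' vis' := by
  rw [pvALoop.eq_def]
  simp only [hd, if_false]
  cases hscan : pvAScan target d (PySem.Dict.getD (PySem.Dict.mk g) x []) qs vis with
  | none => rfl
  | some r => obtain ⟨q', vis'⟩ := r; rfl

theorem pvBRounds_eq_mid (g : List (Int × List Int)) (target : Int) :
    ∀ (r : Nat) (F : List Int) (vis : PySem.Set Int),
    pvBRounds g target r F vis = pvBMid g target r F [] vis := by
  intro r
  induction r with
  | zero => intro F vis; rfl
  | succ s ih =>
    intro F vis
    rw [pvBRounds, pvBMid]
    cases pvBFrontier g target F [] vis with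
    | none => rfl
    | some p =>
      by_cases h : p.1 = []
      · simp [h]
      · simp [h, ih]

-- accumulator lemma for the middle model's neighbour scan
theorem pvBScan_acc (target : Int) :
    ∀ (ys acc : List Int) (vis : PySem.Set Int),
    pvBScan target ys acc vis =
      (pvBScan target ys [] vis).map (fun r => (acc ++ r.1, r.2)) := by
  intro ys
  induction ys with
  | nil => intro acc vis; simp [pvBScan]
  | cons y ys ih =>
    intro acc vis
    by_cases ht : y = target
    · simp [pvBScan, ht]
    · by_cases hv : y ∈ vis
      · rw [pvBScan, if_neg ht, if_pos hv, pvBScan, if_neg ht, if_pos hv]; exact ih acc vis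
      · rw [pvBScan, if_neg ht, if_neg hv, pvBScan, if_neg ht, if_neg hv]
        simp only [List.nil_append]
        rw [ih (acc ++ [y]) _, ih [y] _]
        cases pvBScan target ys [] (PySem.Set.add vis y) with
        | none => rfl
        | some r => simp

-- A's neighbour scan is the middle model's scan, with the additions paired with depth d+1
theorem pvAScan_eq_bscan (target d : Int) :
    ∀ (ys : List Int) (q : List (Int × Int)) (vis : PySem.Set Int),
    pvAScan target d ys q vis =
      (pvBScan target ys [] vis).map (fun r => (q ++ r.1.map (fun y => (y, d + 1)), r.2)) := by
  intro ys
  induction ys with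
  | nil => intro q vis; simp [pvAScan, pvBScan]
  | cons y ys ih =>
    intro q vis
    by_cases ht : y = target
    · simp [pvAScan, pvBScan, ht]
    · by_cases hv : y ∈ vis
      · rw [pvAScan, if_neg ht, if_pos hv, pvBScan, if_neg ht, if_pos hv]; exact ih q vis
      · rw [pvAScan, if_neg ht, if_neg hv, pvBScan, if_neg ht, if_neg hv]
        simp only [List.nil_append]
        rw [ih (q ++ [(y, d + 1)]) _, pvBScan_acc target ys [y] _]
        cases pvBScan target ys [] (PySem.Set.add vis y) with
        | none => rfl
        | some r => simp

-- queue entries all at depth ≥ limit: A's loop drains to `none`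
theorem pvALoop_none_of_deep (g : List (Int × List Int)) (target limit : Int) :
    ∀ (q : List (Int × Int)) (vis : PySem.Set Int),
    (∀ p ∈ q, limit ≤ p.2) → pvALoop g target limit q vis = none := by
  intro q
  induction q with
  | nil => intro vis _; exact pvALoop_nil g target limit vis
  | cons p qs ih =>
    intro vis h
    obtain ⟨x, d⟩ := p
    have hd : limit ≤ d := h (x, d) List.mem_cons_self
    rw [pvALoop_cons_skip g target limit x d qs vis hd]
    exact ih vis (fun p hp => h p (List.mem_cons_of_mem _ hp))

-- any distance A's loop returns is at most the limit
theorem pvALoop_some_le (g : List (Int × List Int)) (target limit : Int) :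
    ∀ (q : List (Int × Int)) (vis : PySem.Set Int) (dd : Int),
    pvALoop g target limit q vis = some dd → dd ≤ limit := by
  intro q vis dd h
  induction q, vis using pvALoop.induct g target limit with
  | case1 vis => rw [pvALoop_nil] at h; exact absurd h (by simp)
  | case2 x d qs vis hd ih => rw [pvALoop_cons_skip g target limit x d qs vis hd] at h; exact ih h
  | case3 x d qs vis hd hscan =>
    rw [pvALoop_cons_go g target limit x d qs vis hd, hscan] at h
    simp at h
    omega
  | case4 x d qs vis hd q' vis' hscan ih =>
    rw [pvALoop_cons_go g target limit x d qs vis hd, hscan] at h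
    exact ih h

-- THE SIMULATION: A's deque loop on a queue that is "frontier remainder at depth d, then the
-- partial next frontier at depth d+1" returns none exactly when the level BFS reports unreachable.
theorem pvSim (g : List (Int × List Int)) (target limit : Int) :
    ∀ (r : Nat) (d : Int) (F N : List Int) (vis : PySem.Set Int),
    0 ≤ d → r = (limit - d).toNat →
    ((pvALoop g target limit
        (F.map (fun x => (x, d)) ++ N.map (fun x => (x, d + 1))) vis = none) ↔
      (pvBMid g target r F N vis = false)) := by
  intro r
  induction r with
  | zero =>
    intro d F N vis hd hr
    have hlim : limit ≤ d := by omega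
    rw [pvALoop_none_of_deep g target limit _ vis (by
      intro p hp
      rcases List.mem_append.1 hp with h | h
      · obtain ⟨x, _, hx⟩ := List.mem_map.1 h; rw [← hx]; exact hlim
      · obtain ⟨x, _, hx⟩ := List.mem_map.1 h; rw [← hx]; simp; omega)]
    rw [pvBMid]
    simp
  | succ s ih =>
    intro d F N vis hd hr
    induction F generalizing N vis with
    | nil =>
      by_cases hN : N = []
      · subst hN
        simp only [List.map_nil, List.append_nil]
        rw [pvALoop_nil, pvBMid]
        simp [pvBFrontier]
      · have hlt : d < limit := by omega
        have heq : (([] : List Int).map (fun x => (x, d)) ++ N.map (fun x => (x, d + 1)))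
            = N.map (fun x => (x, d + 1)) ++ ([] : List Int).map (fun x => (x, d + 1 + 1)) := by simp
        rw [heq, ih (d + 1) N [] vis (by omega) (by omega)]
        have hB : pvBMid g target (s + 1) [] N vis = pvBMid g target s N [] vis := by
          rw [pvBMid]
          simp [pvBFrontier, hN]
        rw [hB]
    | cons x xs ihF =>
      have hlt : d < limit := by omega
      rw [List.map_cons, List.cons_append,
        pvALoop_cons_go g target limit x d _ vis (by omega), pvAScan_eq_bscan]
      have hfr : pvBFrontier g target (x :: xs) N vis =
          match pvBScan target (PySem.Dict.getD (PySem.Dict.mk g) x []) N vis with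
          | none => none
          | some (nxt', vis') => pvBFrontier g target xs nxt' vis' := by
        rw [pvBFrontier]
      rw [pvBScan_acc target _ N vis] at hfr
      cases hscan : pvBScan target (PySem.Dict.getD (PySem.Dict.mk g) x []) [] vis with
      | none =>
        rw [hscan] at hfr
        simp only [Option.map_none] at hfr ⊢
        rw [pvBMid, hfr]
        simp
      | some r =>
        obtain ⟨adds, vis'⟩ := r
        rw [hscan] at hfr
        simp only [Option.map_some] at hfr ⊢
        have hq : (xs.map (fun x => (x, d)) ++ N.map (fun x => (x, d + 1))) ++
            adds.map (fun y => (y, d + 1)) =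
            xs.map (fun x => (x, d)) ++ (N ++ adds).map (fun x => (x, d + 1)) := by
          simp [List.map_append]
        rw [hq, ihF (N ++ adds) vis']
        have hB : pvBMid g target (s + 1) (x :: xs) N vis =
            pvBMid g target (s + 1) xs (N ++ adds) vis' := by
          rw [pvBMid, hfr]
          rfl
        rw [hB]

-- the per-edge decision: A adds the edge iff the level BFS misses the target (u ≠ v)
theorem pvDecide (H : List (Int × List Int)) (u v limit : Int) (huv : u ≠ v) :
    (match pvBfs H u v limit with | none => true | some dd => decide (limit < dd)) =
      !(pvBWithin H u v limit) := by
  unfold pvBfs pvBWithin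
  rw [if_neg huv, if_neg huv]
  have hsim := pvSim H v limit limit.toNat 0 [u] [] (PySem.Set.ofList [u]) le_rfl (by simp)
  simp only [List.map_cons, List.map_nil, List.append_nil] at hsim
  rw [pvBRounds_eq_mid]
  cases hA : pvALoop H v limit [(u, 0)] (PySem.Set.ofList [u]) with
  | none =>
    rw [hA] at hsim
    simp at hsim
    simp [hsim]
  | some dd =>
    rw [hA] at hsim
    have hle := pvALoop_some_le H v limit [(u, 0)] (PySem.Set.ofList [u]) dd hA
    simp at hsim
    rw [hsim]
    simp
    omega

-- ===== level BFS ⟺ ball closure =====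

-- abbreviation used only in proofs
def pvNb (g : List (Int × List Int)) (x : Int) : List Int :=
  PySem.Dict.getD (PySem.Dict.mk g) x []

theorem mem_foldl_add (xs : List Int) (s : PySem.Set Int) (y : Int) :
    y ∈ xs.foldl (fun a z => PySem.Set.add a z) s ↔ y ∈ s ∨ y ∈ xs := by
  induction xs generalizing s with
  | nil => simp
  | cons x xs ih =>
    simp only [List.foldl_cons, ih, PySem.Set.mem_add]
    constructor
    · rintro (⟨h | h⟩ | h) <;> simp [h]
    · rintro (h | h)
      · exact Or.inl (Or.inl h)
      · rcases List.mem_cons.1 h with h | h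
        · exact Or.inl (Or.inr h)
        · exact Or.inr h

theorem mem_pvGrow (g : List (Int × List Int)) (ball : PySem.Set Int) (x : Int) :
    x ∈ pvGrow g ball ↔ x ∈ ball ∨ ∃ z ∈ ball, x ∈ pvNb g z := by
  unfold pvGrow
  have main : ∀ (l : List Int) (acc : PySem.Set Int),
      x ∈ l.foldl (fun grown z =>
        (PySem.Dict.getD (PySem.Dict.mk g) z []).foldl (fun a y => PySem.Set.add a y) grown) acc ↔
      x ∈ acc ∨ ∃ z ∈ l, x ∈ pvNb g z := by
    intro l
    induction l with
    | nil => intro acc; simp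
    | cons z zs ih =>
      intro acc
      simp only [List.foldl_cons, ih, mem_foldl_add]
      unfold pvNb
      constructor
      · rintro (⟨h | h⟩ | ⟨w, hw, hx⟩)
        · exact Or.inl h
        · exact Or.inr ⟨z, List.mem_cons_self, h⟩
        · exact Or.inr ⟨w, List.mem_cons_of_mem _ hw, hx⟩
      · rintro (h | ⟨w, hw, hx⟩)
        · exact Or.inl (Or.inl h)
        · rcases List.mem_cons.1 hw with h | h
          · subst h; exact Or.inl (Or.inr hx)
          · exact Or.inr ⟨w, h, hx⟩
  exact main ball ball

theorem mem_pvBallGo_of_mem (g : List (Int × List Int)) :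
    ∀ (r : Nat) (ball : PySem.Set Int) (x : Int), x ∈ ball → x ∈ pvBallGo g r ball := by
  intro r
  induction r with
  | zero => intro ball x h; exact h
  | succ s ih =>
    intro ball x h
    rw [pvBallGo]
    by_cases he : PySem.Set.equal (pvGrow g ball) ball = true
    · simp only [he, if_true]; exact h
    · simp only [he]
      exact ih _ x ((mem_pvGrow g ball x).2 (Or.inl h))

theorem pvBScan_none_iff (target : Int) :
    ∀ (ys nxt : List Int) (vis : PySem.Set Int),
    pvBScan target ys nxt vis = none ↔ target ∈ ys := by
  intro ys
  induction ys with
  | nil => intro nxt vis; simp [pvBScan]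
  | cons y ys ih =>
    intro nxt vis
    by_cases ht : y = target
    · simp [pvBScan, ht]
    · by_cases hv : y ∈ vis
      · rw [pvBScan, if_neg ht, if_pos hv]
        simp [ih, Ne.symm ht]
      · rw [pvBScan, if_neg ht, if_neg hv]
        simp [ih, Ne.symm ht]

theorem pvBScan_some (target : Int) :
    ∀ (ys nxt : List Int) (vis : PySem.Set Int) (nxt' : List Int) (vis' : PySem.Set Int),
    pvBScan target ys nxt vis = some (nxt', vis') →
    (∀ x, x ∈ vis' ↔ x ∈ vis ∨ x ∈ ys) ∧
    (∀ x, x ∈ nxt' ↔ x ∈ nxt ∨ (x ∈ ys ∧ x ∉ vis)) := by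
  intro ys
  induction ys with
  | nil =>
    intro nxt vis nxt' vis' h
    simp [pvBScan] at h
    obtain ⟨h1, h2⟩ := h
    subst h1; subst h2
    exact ⟨fun x => by simp, fun x => by simp⟩
  | cons y ys ih =>
    intro nxt vis nxt' vis' h
    by_cases ht : y = target
    · simp [pvBScan, ht] at h
    · by_cases hv : y ∈ vis
      · rw [pvBScan, if_neg ht, if_pos hv] at h
        obtain ⟨h1, h2⟩ := ih nxt vis nxt' vis' h
        refine ⟨fun x => ?_, fun x => ?_⟩
        · rw [h1 x]
          constructor
          · rintro (h | h) <;> simp [h]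
          · rintro (h | h)
            · exact Or.inl h
            · rcases List.mem_cons.1 h with h | h
              · subst h; exact Or.inl hv
              · exact Or.inr h
        · rw [h2 x]
          constructor
          · rintro (h | ⟨h3, h4⟩)
            · exact Or.inl h
            · exact Or.inr ⟨List.mem_cons_of_mem _ h3, h4⟩
          · rintro (h | ⟨h3, h4⟩)
            · exact Or.inl h
            · rcases List.mem_cons.1 h3 with h | h
              · subst h; exact absurd hv h4
              · exact Or.inr ⟨h, h4⟩
      · rw [pvBScan, if_neg ht, if_neg hv] at h
        obtain ⟨h1, h2⟩ := ih (nxt ++ [y]) (PySem.Set.add vis y) nxt' vis' h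
        refine ⟨fun x => ?_, fun x => ?_⟩
        · rw [h1 x, PySem.Set.mem_add]
          constructor
          · rintro (⟨h | h⟩ | h) <;> simp [h]
          · rintro (h | h)
            · exact Or.inl (Or.inl h)
            · rcases List.mem_cons.1 h with h | h
              · exact Or.inl (Or.inr h)
              · exact Or.inr h
        · rw [h2 x]
          simp only [List.mem_append, List.mem_singleton, PySem.Set.mem_add]
          constructor
          · rintro ((h | h) | ⟨h3, h4⟩)
            · exact Or.inl h
            · subst h; exact Or.inr ⟨List.mem_cons_self, hv⟩
            · exact Or.inr ⟨List.mem_cons_of_mem _ h3, fun hc => h4 (Or.inl hc)⟩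
          · rintro (h | ⟨h3, h4⟩)
            · exact Or.inl (Or.inl h)
            · rcases List.mem_cons.1 h3 with h | h
              · exact Or.inl (Or.inr h)
              · by_cases hxy : x = y
                · exact Or.inl (Or.inr hxy)
                · exact Or.inr ⟨h, fun hc => by rcases hc with hc | hc; exact h4 hc; exact hxy hc⟩

theorem pvBFrontier_none_iff (g : List (Int × List Int)) (target : Int) :
    ∀ (F nxt : List Int) (vis : PySem.Set Int),
    pvBFrontier g target F nxt vis = none ↔ ∃ z ∈ F, target ∈ pvNb g z := by
  intro F
  induction F with
  | nil => intro nxt vis; simp [pvBFrontier]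
  | cons x xs ih =>
    intro nxt vis
    rw [pvBFrontier]
    cases hscan : pvBScan target (PySem.Dict.getD (PySem.Dict.mk g) x []) nxt vis with
    | none =>
      have hmem := (pvBScan_none_iff target _ nxt vis).1 hscan
      exact iff_of_true rfl ⟨x, List.mem_cons_self, hmem⟩
    | some r =>
      obtain ⟨nxt1, vis1⟩ := r
      have hnt : target ∉ pvNb g x := by
        intro hc
        have hc' : target ∈ PySem.Dict.getD (PySem.Dict.mk g) x [] := hc
        have hnone := (pvBScan_none_iff target _ nxt vis).2 hc'
        rw [hscan] at hnone
        exact absurd hnone (by simp)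
      show pvBFrontier g target xs nxt1 vis1 = none ↔ _
      rw [ih nxt1 vis1]
      constructor
      · rintro ⟨z, hz, hzt⟩; exact ⟨z, List.mem_cons_of_mem _ hz, hzt⟩
      · rintro ⟨z, hz, hzt⟩
        rcases List.mem_cons.1 hz with h | h
        · subst h; exact absurd hzt hnt
        · exact ⟨z, h, hzt⟩

theorem pvBFrontier_some (g : List (Int × List Int)) (target : Int) :
    ∀ (F nxt : List Int) (vis : PySem.Set Int) (nxt' : List Int) (vis' : PySem.Set Int),
    pvBFrontier g target F nxt vis = some (nxt', vis') →
    (∀ x, x ∈ vis' ↔ x ∈ vis ∨ ∃ z ∈ F, x ∈ pvNb g z) ∧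
    (∀ x, x ∈ nxt' ↔ x ∈ nxt ∨ (x ∉ vis ∧ ∃ z ∈ F, x ∈ pvNb g z)) := by
  intro F
  induction F with
  | nil =>
    intro nxt vis nxt' vis' h
    simp [pvBFrontier] at h
    obtain ⟨h1, h2⟩ := h
    subst h1; subst h2
    exact ⟨fun x => by simp, fun x => by simp⟩
  | cons z zs ih =>
    intro nxt vis nxt' vis' h
    rw [pvBFrontier] at h
    cases hscan : pvBScan target (PySem.Dict.getD (PySem.Dict.mk g) z []) nxt vis with
    | none => rw [hscan] at h; exact absurd h (by simp)
    | some r =>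
      obtain ⟨nxt1, vis1⟩ := r
      rw [hscan] at h
      obtain ⟨s1, s2⟩ := pvBScan_some target _ nxt vis nxt1 vis1 hscan
      obtain ⟨f1, f2⟩ := ih nxt1 vis1 nxt' vis' h
      have hnb : ∀ x, x ∈ pvNb g z ↔ x ∈ PySem.Dict.getD (PySem.Dict.mk g) z [] := by
        intro x; rfl
      refine ⟨fun x => ?_, fun x => ?_⟩
      · rw [f1 x, s1 x]
        constructor
        · rintro ((h | h) | ⟨w, hw, hx⟩)
          · exact Or.inl h
          · exact Or.inr ⟨z, List.mem_cons_self, (hnb x).2 h⟩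
          · exact Or.inr ⟨w, List.mem_cons_of_mem _ hw, hx⟩
        · rintro (h | ⟨w, hw, hx⟩)
          · exact Or.inl (Or.inl h)
          · rcases List.mem_cons.1 hw with h | h
            · subst h; exact Or.inl (Or.inr ((hnb x).1 hx))
            · exact Or.inr ⟨w, h, hx⟩
      · rw [f2 x, s2 x, s1 x]
        constructor
        · rintro ((h | ⟨h3, h4⟩) | ⟨h5, w, hw, hx⟩)
          · exact Or.inl h
          · exact Or.inr ⟨h4, z, List.mem_cons_self, (hnb x).2 h3⟩
          · exact Or.inr ⟨fun hc => h5 (Or.inl hc), w, List.mem_cons_of_mem _ hw, hx⟩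
        · rintro (h | ⟨h4, w, hw, hx⟩)
          · exact Or.inl (Or.inl h)
          · rcases List.mem_cons.1 hw with h | h
            · subst h; exact Or.inl (Or.inr ⟨(hnb x).1 hx, h4⟩)
            · by_cases hz : x ∈ PySem.Dict.getD (PySem.Dict.mk g) z []
              · exact Or.inl (Or.inr ⟨hz, h4⟩)
              · exact Or.inr ⟨fun hc => by rcases hc with hc | hc; exact h4 hc; exact hz hc,
                  w, h, hx⟩

-- the level BFS answers exactly "target in the r-round ball closure", under the BFS invariant
theorem pvRounds_iff_ball (g : List (Int × List Int)) (target : Int) :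
    ∀ (r : Nat) (F : List Int) (vis ball : PySem.Set Int),
    (∀ x : Int, x ∈ vis ↔ x ∈ ball) →
    (∀ x ∈ F, x ∈ vis) →
    (∀ x : Int, x ∈ vis → x ∉ F → ∀ y ∈ pvNb g x, y ∈ vis) →
    target ∉ vis →
    pvBRounds g target r F vis = decide (target ∈ pvBallGo g r ball) := by
  intro r
  induction r with
  | zero =>
    intro F vis ball hvb _ _ htv
    rw [pvBRounds, pvBallGo]
    have : target ∉ ball := fun h => htv ((hvb target).2 h)
    simp [this]
  | succ s ih =>
    intro F vis ball hvb hFv hcl htv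
    cases hfr : pvBFrontier g target F [] vis with
    | none =>
      have hL : pvBRounds g target (s + 1) F vis = true := by rw [pvBRounds, hfr]
      obtain ⟨z, hz, hzt⟩ := (pvBFrontier_none_iff g target F [] vis).1 hfr
      have htg : target ∈ pvGrow g ball :=
        (mem_pvGrow g ball target).2 (Or.inr ⟨z, (hvb z).1 (hFv z hz), hzt⟩)
      have hne : PySem.Set.equal (pvGrow g ball) ball = false := by
        by_contra hc
        have : PySem.Set.equal (pvGrow g ball) ball = true := by
          cases h : PySem.Set.equal (pvGrow g ball) ball
          · exact absurd h hc
          · rfl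
        have := (PySem.Set.equal_iff _ _).1 this target
        exact htv ((hvb target).2 (this.1 htg))
      have hR : pvBallGo g (s + 1) ball = pvBallGo g s (pvGrow g ball) := by
        rw [pvBallGo]; simp [hne]
      rw [hL, hR]
      simp [mem_pvBallGo_of_mem g s (pvGrow g ball) target htg]
    | some p =>
      obtain ⟨nxt, vis'⟩ := p
      have hL : pvBRounds g target (s + 1) F vis =
          (if nxt = [] then false else pvBRounds g target s nxt vis') := by
        rw [pvBRounds, hfr]
      rw [hL]
      have hntF : ¬ ∃ z ∈ F, target ∈ pvNb g z := by
        intro hc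
        rw [(pvBFrontier_none_iff g target F [] vis).2 hc] at hfr
        exact absurd hfr (by simp)
      obtain ⟨f1, f2⟩ := pvBFrontier_some g target F [] vis nxt vis' hfr
      -- grown ≡ vis'
      have hgv : ∀ x : Int, x ∈ pvGrow g ball ↔ x ∈ vis' := by
        intro x
        rw [mem_pvGrow, f1 x]
        constructor
        · rintro (h | ⟨z, hz, hx⟩)
          · exact Or.inl ((hvb x).2 h)
          · have hzv : z ∈ vis := (hvb z).2 hz
            by_cases hzF : z ∈ F
            · exact Or.inr ⟨z, hzF, hx⟩
            · exact Or.inl (hcl z hzv hzF x hx)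
        · rintro (h | ⟨z, hz, hx⟩)
          · exact Or.inl ((hvb x).1 h)
          · exact Or.inr ⟨z, (hvb z).1 (hFv z hz), hx⟩
      by_cases hnx : nxt = []
      · -- stabilized: grown ≡ ball, both sides false
        subst hnx
        have hstab : ∀ x : Int, x ∈ pvGrow g ball ↔ x ∈ ball := by
          intro x
          rw [hgv x, f1 x, ← hvb x]
          constructor
          · rintro (h | ⟨z, hz, hx⟩)
            · exact h
            · by_contra hxv
              have : x ∈ ([] : List Int) := (f2 x).2 (Or.inr ⟨hxv, z, hz, hx⟩)
              simp at this
          · exact Or.inl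
        have heq : PySem.Set.equal (pvGrow g ball) ball = true :=
          (PySem.Set.equal_iff _ _).2 hstab
        have hR : pvBallGo g (s + 1) ball = ball := by
          rw [pvBallGo]; simp [heq]
        rw [hR]
        have : target ∉ ball := fun h => htv ((hvb target).2 h)
        simp [this]
      · -- frontier nonempty: recurse
        have hne : PySem.Set.equal (pvGrow g ball) ball = false := by
          obtain ⟨x0, hx0⟩ := List.exists_mem_of_ne_nil nxt hnx
          have hx0' := (f2 x0).1 hx0
          simp only [List.not_mem_nil, false_or] at hx0'
          obtain ⟨hx0v, z, hz, hx0n⟩ := hx0'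
          by_contra hc
          have heq : PySem.Set.equal (pvGrow g ball) ball = true := by
            cases h : PySem.Set.equal (pvGrow g ball) ball
            · exact absurd h hc
            · rfl
          have hx0g : x0 ∈ pvGrow g ball := (hgv x0).2 ((f1 x0).2 (Or.inr ⟨z, hz, hx0n⟩))
          have := ((PySem.Set.equal_iff _ _).1 heq x0).1 hx0g
          exact hx0v ((hvb x0).2 this)
        have hR : pvBallGo g (s + 1) ball = pvBallGo g s (pvGrow g ball) := by
          rw [pvBallGo]; simp [hne]
        rw [hR]
        simp only [hnx, if_false]
        apply ih nxt vis' (pvGrow g ball)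
        · intro x; exact (hgv x).symm
        · intro x hx
          have := (f2 x).1 hx
          simp only [List.not_mem_nil, false_or] at this
          exact (f1 x).2 (Or.inr this.2)
        · intro x hxv' hxF y hy
          have hxvis : x ∈ vis := by
            rcases (f1 x).1 hxv' with h | h
            · exact h
            · by_contra hxv
              exact hxF ((f2 x).2 (Or.inr ⟨hxv, h⟩))
          by_cases hxF0 : x ∈ F
          · exact (f1 y).2 (Or.inr ⟨x, hxF0, hy⟩)
          · exact (f1 y).2 (Or.inl (hcl x hxvis hxF0 y hy))
        · intro hc
          rcases (f1 target).1 hc with h | h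
          · exact htv h
          · exact hntF h

-- the level BFS equals B's ball-membership test
theorem pvBWithin_eq_ball (g : List (Int × List Int)) (u v limit : Int) :
    pvBWithin g u v limit = decide (v ∈ pvBall g u limit) := by
  unfold pvBWithin pvBall
  by_cases huv : u = v
  · subst huv
    have : u ∈ pvBallGo g limit.toNat (PySem.Set.ofList [u]) :=
      mem_pvBallGo_of_mem g _ _ u (by simp [PySem.Set.mem_ofList])
    simp [this]
  · rw [if_neg huv]
    apply pvRounds_iff_ball g v limit.toNat [u] (PySem.Set.ofList [u]) (PySem.Set.ofList [u])
    · intro x; rfl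
    · intro x hx
      simp only [List.mem_singleton] at hx
      simp [PySem.Set.mem_ofList, hx]
    · intro x hxv hxF
      simp only [PySem.Set.mem_ofList, List.mem_singleton] at hxv hxF
      exact absurd hxv hxF
    · simp [PySem.Set.mem_ofList, Ne.symm huv]

-- ===== outer loop: edge list fold = fused nested fold =====

theorem pvFind_self (G : List (Int × List Int)) (p : Int × List Int)
    (hnd : (G.map Prod.fst).Nodup) (hp : p ∈ G) :
    G.find? (fun q => q.1 == p.1) = some p := by
  induction G with
  | nil => simp at hp
  | cons q G ih =>
    simp only [List.map_cons, List.nodup_cons] at hnd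
    rcases List.mem_cons.1 hp with h | h
    · subst h
      have hpos : (fun q' : Int × List Int => q'.1 == p.1) p = true := by simp
      exact List.find?_cons_of_pos hpos
    · by_cases hq : q.1 == p.1
      · exfalso
        have : p.1 ∈ G.map Prod.fst := List.mem_map.2 ⟨p, h, rfl⟩
        have hq' : q.1 = p.1 := by simpa using hq
        exact hnd.1 (hq' ▸ this)
      · have hq' : ¬ ((fun q' : Int × List Int => q'.1 == p.1) q = true) := by simpa using hq
        have hq0 : (q.1 == p.1) = false := by simpa using hq
        simp only [List.find?_cons, hq0]
        exact ih hnd.2 h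

theorem pvGetD_self (G : List (Int × List Int)) (p : Int × List Int)
    (hnd : (G.map Prod.fst).Nodup) (hp : p ∈ G) :
    PySem.Dict.getD (PySem.Dict.mk G) p.1 [] = p.2 := by
  unfold PySem.Dict.getD PySem.Dict.get?
  have : (PySem.Dict.mk G).items.find? (fun q => q.1 == p.1) = some p := pvFind_self G p hnd hp
  rw [this]
  rfl

theorem pvFoldlFlatMap {α β γ : Type} (l : List α) (h : α → List β) (f : γ → β → γ) (a : γ) :
    (l.flatMap h).foldl f a = l.foldl (fun a x => (h x).foldl f a) a := by
  induction l generalizing a with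
  | nil => simp
  | cons x xs ih => simp [List.flatMap_cons, List.foldl_append, ih]

theorem pvFoldFilterMap {γ : Type} (u : Int) (step : γ → (Int × Int) → γ)
    (hskip : ∀ (a : γ) (y : Int), ¬ u < y → step a (u, y) = a) :
    ∀ (ys : List Int) (a : γ),
    ((ys.filter (fun v => u < v)).map (fun v => (u, v))).foldl step a =
      ys.foldl (fun a y => step a (u, y)) a := by
  intro ys
  induction ys with
  | nil => intro a; simp
  | cons y ys ih =>
    intro a
    by_cases hy : u < y
    · rw [List.foldl_cons, List.filter_cons_of_pos (by simpa using hy), List.map_cons,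
        List.foldl_cons]
      exact ih _
    · rw [List.foldl_cons, List.filter_cons_of_neg (by simpa using hy), hskip a y hy]
      exact ih a

-- the two edge-extraction loops produce the same edge list
theorem pvEdges_eq (G : List (Int × List Int)) :
    G.foldl (fun es p =>
        (PySem.Dict.getD (PySem.Dict.mk G) p.1 []).foldl
          (fun es v => if p.1 < v then es ++ [(p.1, v)] else es) es) [] =
      G.flatMap (fun p =>
        ((PySem.Dict.getD (PySem.Dict.mk G) p.1 []).filter (fun v => p.1 < v)).map
          (fun v => (p.1, v))) := by
  have h : ∀ (acc : List (Int × Int)),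
      G.foldl (fun es p =>
        (PySem.Dict.getD (PySem.Dict.mk G) p.1 []).foldl
          (fun es v => if p.1 < v then es ++ [(p.1, v)] else es) es) acc =
      acc ++ G.flatMap (fun p =>
        ((PySem.Dict.getD (PySem.Dict.mk G) p.1 []).filter (fun v => p.1 < v)).map
          (fun v => (p.1, v))) := by
    intro acc
    rw [← PySem.List.foldl_append_eq_flatMap]
    apply PySem.List.foldl_congr_mem
    intro es p _
    have := PySem.List.foldl_append_ite (α := Int) (β := Int × Int)
      (fun v => p.1 < v) (fun v => (p.1, v)) (PySem.Dict.getD (PySem.Dict.mk G) p.1 []) es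
    simpa using this
  simpa using h []

theorem pvEdges_lt (G : List (Int × List Int)) :
    ∀ e ∈ G.flatMap (fun p =>
        ((PySem.Dict.getD (PySem.Dict.mk G) p.1 []).filter (fun v => p.1 < v)).map
          (fun v => (p.1, v))), e.1 < e.2 := by
  intro e he
  obtain ⟨p, _, hin⟩ := List.mem_flatMap.1 he
  obtain ⟨v, hv, hev⟩ := List.mem_map.1 hin
  have := List.of_mem_filter hv
  rw [← hev]
  simpa using this

-- ===== VERDICT (by name: the statement is the Claim_ definition above) =====
theorem build_greedy_spanner_spec : Claim_equal_build_greedy_spanner := by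
  intro G k _ hpre
  obtain ⟨hnd, _⟩ := hpre
  unfold Spec_build_greedy_spanner build_greedy_spanner build_greedy_spanner_alt
  by_cases hG : G.length = 0
  · simp [hG]
  · simp only [if_neg hG]
    rw [pvEdges_eq]
    congr 1
    -- A's fold over the edge list, step rewritten to B's per-edge decision
    have step1 :
        (G.flatMap (fun p =>
            ((PySem.Dict.getD (PySem.Dict.mk G) p.1 []).filter (fun v => p.1 < v)).map
              (fun v => (p.1, v)))).foldl
          (fun H e =>
            let dist := pvBfs H.items e.1 e.2 (2 * k - 1)
            if (match dist with | none => true | some dd => decide ((2 * k - 1) < dd)) then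
              PySem.Dict.modify (PySem.Dict.modify H e.1 [] (fun l => l ++ [e.2])) e.2 []
                (fun l => l ++ [e.1])
            else H)
          (G.foldl (fun h p => PySem.Dict.insert h p.1 ([] : List Int)) (PySem.Dict.mk [])) =
        (G.flatMap (fun p =>
            ((PySem.Dict.getD (PySem.Dict.mk G) p.1 []).filter (fun v => p.1 < v)).map
              (fun v => (p.1, v)))).foldl
          (fun H e =>
            if e.1 < e.2 ∧ e.2 ∉ pvBall H.items e.1 (2 * k - 1) then
              PySem.Dict.modify (PySem.Dict.modify H e.1 [] (fun l => l ++ [e.2])) e.2 []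
                (fun l => l ++ [e.1])
            else H)
          (G.foldl (fun h p => PySem.Dict.insert h p.1 ([] : List Int)) (PySem.Dict.mk [])) := by
      apply PySem.List.foldl_congr_mem
      intro H e he
      have hlt := pvEdges_lt G e he
      simp only []
      rw [pvDecide H.items e.1 e.2 (2 * k - 1) (by omega), pvBWithin_eq_ball]
      by_cases hm : e.2 ∈ pvBall H.items e.1 (2 * k - 1)
      · simp [hm]
      · simp [hm, hlt]
    rw [step1, pvFoldlFlatMap]
    apply PySem.List.foldl_congr_mem
    intro H p hp
    rw [pvGetD_self G p hnd hp]
    rw [pvFoldFilterMap p.1 _ (fun a y hy => by simp [hy]) p.2 H]
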